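-- pv_equiv track=rewrite | github.com/FlipsideCrypto/data-discovery | src/data_discovery/core/project_discovery.py | _categorize_blockchain
-- ===== SOURCE A (Python) =====
-- def _categorize_blockchain(blockchain: str) -> str:
--     """Categorize blockchain by type."""
--     categories = {
--         'l1': ['bitcoin', 'avalanche', 'near', 'flow', 'stellar', 'ton', 'aleo', 'aptos', 'movement'],
--         'evm': ['ethereum', 'arbitrum', 'optimism', 'polygon', 'base', 'bsc', 'gnosis', 'mantle', 'blast', 'aurora', 'boba', 'ronin', 'ink', 'swell', 'kaia', 'rise', 'monad', 'core', 'mezo'],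
--         'ibc': ['cosmos', 'osmosis', 'terra', 'thorchain', 'axelar', 'maya'],
--         'svm': ['solana', 'eclipse'],
--         'multi-chain': ['crosschain', 'external'],
--         'internal': ['kairos']
--     }
--
--     for category, blockchains in categories.items():
--         if blockchain.lower() in blockchains:
--             return category
--
--     return 'unknown'
-- ===== SOURCE B (Python) =====
-- # B: one flat name->category dict built as a literal; lookup replaces the loop over categories.
-- _CATEGORY_BY_CHAIN = {
--     'bitcoin': 'l1', 'avalanche': 'l1', 'near': 'l1', 'flow': 'l1', 'stellar': 'l1',
--     'ton': 'l1', 'aleo': 'l1', 'aptos': 'l1', 'movement': 'l1',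
--     'ethereum': 'evm', 'arbitrum': 'evm', 'optimism': 'evm', 'polygon': 'evm', 'base': 'evm',
--     'bsc': 'evm', 'gnosis': 'evm', 'mantle': 'evm', 'blast': 'evm', 'aurora': 'evm',
--     'boba': 'evm', 'ronin': 'evm', 'ink': 'evm', 'swell': 'evm', 'kaia': 'evm',
--     'rise': 'evm', 'monad': 'evm', 'core': 'evm', 'mezo': 'evm',
--     'cosmos': 'ibc', 'osmosis': 'ibc', 'terra': 'ibc', 'thorchain': 'ibc', 'axelar': 'ibc', 'maya': 'ibc',
--     'solana': 'svm', 'eclipse': 'svm',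
--     'crosschain': 'multi-chain', 'external': 'multi-chain',
--     'kairos': 'internal',
-- }
--
-- def _categorize_blockchain(blockchain: str) -> str:
--     """Categorize blockchain by type."""
--     return _CATEGORY_BY_CHAIN.get(blockchain.lower(), 'unknown')
-- ===== Notes on version B (the rewrite author's own statement) =====
-- stated objective: simpler
-- what changed: Replaced the loop over the category table with inner list-membership scans by a single flat name-to-category dict built once, so the function body is one O(1) lookup with a default.
import Mathlib
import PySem

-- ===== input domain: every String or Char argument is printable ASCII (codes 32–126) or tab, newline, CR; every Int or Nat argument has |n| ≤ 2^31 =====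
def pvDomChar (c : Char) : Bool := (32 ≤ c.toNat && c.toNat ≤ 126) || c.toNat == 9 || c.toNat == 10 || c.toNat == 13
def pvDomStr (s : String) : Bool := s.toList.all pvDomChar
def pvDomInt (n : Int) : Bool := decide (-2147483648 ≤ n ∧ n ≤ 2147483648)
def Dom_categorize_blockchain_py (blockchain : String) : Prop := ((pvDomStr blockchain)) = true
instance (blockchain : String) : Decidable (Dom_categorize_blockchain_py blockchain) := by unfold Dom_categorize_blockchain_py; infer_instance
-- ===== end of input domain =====

-- B replaces A's loop over category lists by one flat name→category dict lookup (simpler).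

-- ===== PORT A =====
def pvCategories : List (String × List String) :=
  [ ("l1", ["bitcoin", "avalanche", "near", "flow", "stellar", "ton", "aleo", "aptos", "movement"]),
    ("evm", ["ethereum", "arbitrum", "optimism", "polygon", "base", "bsc", "gnosis", "mantle", "blast", "aurora", "boba", "ronin", "ink", "swell", "kaia", "rise", "monad", "core", "mezo"]),
    ("ibc", ["cosmos", "osmosis", "terra", "thorchain", "axelar", "maya"]),
    ("svm", ["solana", "eclipse"]),
    ("multi-chain", ["crosschain", "external"]),
    ("internal", ["kairos"]) ]

-- the for-loop over categories.items(): return the first category whose list contains blockchain.lower()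
def pvScan (low : String) : List (String × List String) → String
  | [] => "unknown"
  | (cat, bs) :: rest => if bs.contains low then cat else pvScan low rest

def categorize_blockchain_py (blockchain : String) : String :=
  pvScan (PySem.Str.lower blockchain) pvCategories

-- ===== PORT B =====
def pvCategoryByChain : PySem.Dict String String := PySem.Dict.mk
  [ ("bitcoin", "l1"), ("avalanche", "l1"), ("near", "l1"), ("flow", "l1"), ("stellar", "l1"),
    ("ton", "l1"), ("aleo", "l1"), ("aptos", "l1"), ("movement", "l1"),
    ("ethereum", "evm"), ("arbitrum", "evm"), ("optimism", "evm"), ("polygon", "evm"), ("base", "evm"),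
    ("bsc", "evm"), ("gnosis", "evm"), ("mantle", "evm"), ("blast", "evm"), ("aurora", "evm"),
    ("boba", "evm"), ("ronin", "evm"), ("ink", "evm"), ("swell", "evm"), ("kaia", "evm"),
    ("rise", "evm"), ("monad", "evm"), ("core", "evm"), ("mezo", "evm"),
    ("cosmos", "ibc"), ("osmosis", "ibc"), ("terra", "ibc"), ("thorchain", "ibc"), ("axelar", "ibc"), ("maya", "ibc"),
    ("solana", "svm"), ("eclipse", "svm"),
    ("crosschain", "multi-chain"), ("external", "multi-chain"),
    ("kairos", "internal") ]

def categorize_blockchain_py_alt (blockchain : String) : String :=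
  pvCategoryByChain.getD (PySem.Str.lower blockchain) "unknown"

-- ===== PRECONDITION & SPEC =====
def Spec_categorize_blockchain_py (blockchain : String) (out : String) : Prop := out = categorize_blockchain_py_alt blockchain
instance (blockchain : String) (out : String) : Decidable (Spec_categorize_blockchain_py blockchain out) := by unfold Spec_categorize_blockchain_py; infer_instance

-- ===== CLAIM (what is proved, stated in full; the proofs are below) =====
def Claim_equal_categorize_blockchain_py : Prop := ∀ (blockchain : String), Dom_categorize_blockchain_py blockchain → Spec_categorize_blockchain_py blockchain (categorize_blockchain_py blockchain)

-- ===== LEMMAS AND PROOFS =====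

-- flatten one category entry: looking up in (names×cat ++ tail) is a membership test on names
theorem pv_get?_mk_map_append (bs : List String) (cat low : String) (tail : List (String × String)) :
    (PySem.Dict.mk (bs.map (fun n => (n, cat)) ++ tail)).get? low =
      if bs.contains low then some cat else (PySem.Dict.mk tail).get? low := by
  induction bs with
  | nil => simp
  | cons b bs ih =>
      simp only [List.map_cons, List.cons_append, PySem.Dict.get?_mk_cons, ih]
      by_cases h : b = low
      · simp [h]
      · have h' : (b == low) = false := by simp [h]
        simp only [h', Bool.false_eq_true, if_false, List.contains_cons, Bool.or_eq_true,
          beq_iff_eq]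
        by_cases hm : bs.contains low
        · simp [List.contains_iff_mem.mp hm]
        · have : ¬ low ∈ bs := fun hmem => hm (List.contains_iff_mem.mpr hmem)
          simp [this, Ne.symm h]

-- A's scan over the category table equals lookup in the flattened dict
theorem pv_scan_eq_lookup (cats : List (String × List String)) (low : String) :
    pvScan low cats =
      (PySem.Dict.mk (cats.flatMap (fun p => p.2.map (fun n => (n, p.1))))).getD low "unknown" := by
  induction cats with
  | nil => rfl
  | cons p rest ih =>
      obtain ⟨cat, bs⟩ := p
      simp only [pvScan, List.flatMap_cons, PySem.Dict.getD_eq_get?_getD,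
        pv_get?_mk_map_append]
      by_cases h : bs.contains low
      · simp [List.contains_iff_mem.mp h]
      · have hm : ¬ low ∈ bs := fun hmem => h (List.contains_iff_mem.mpr hmem)
        simp [hm, ih, PySem.Dict.getD_eq_get?_getD]

-- B's literal flat dict IS the flattening of A's table
theorem pv_flat_eq :
    pvCategoryByChain = PySem.Dict.mk (pvCategories.flatMap (fun p => p.2.map (fun n => (n, p.1)))) := by
  rfl

-- ===== VERDICT (by name: the statement is the Claim_ definition above) =====
theorem categorize_blockchain_py_spec : Claim_equal_categorize_blockchain_py := by
  intro blockchain _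
  unfold Spec_categorize_blockchain_py categorize_blockchain_py categorize_blockchain_py_alt
  rw [pv_flat_eq, pv_scan_eq_lookup]
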